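-- pv_equiv track=rewrite | github.com/keep-me/ResearchOS | packages/ai/project/multi_agent_runner.py | _select_monitor_metric
-- ===== SOURCE A (Python) =====
-- from typing import Any
--
-- _MONITOR_PRIORITY_METRICS = (
--     "accuracy",
--     "acc",
--     "f1",
--     "bleu",
--     "rouge",
--     "score",
--     "success_rate",
--     "win_rate",
--     "loss",
--     "val_loss",
--     "train_loss",
--     "error",
--     "wer",
--     "cer",
-- )
--
-- def _select_monitor_metric(result_summaries: list[dict[str, Any]]) -> str | None:
--     metric_counts: dict[str, int] = {}
--     for item in result_summaries:
--         for key in (item.get("metrics") or {}).keys():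
--             metric_counts[key] = metric_counts.get(key, 0) + 1
--     if not metric_counts:
--         return None
--     for preferred in _MONITOR_PRIORITY_METRICS:
--         for key, count in metric_counts.items():
--             if preferred in key.lower() and count >= 2:
--                 return key
--     ranked = sorted(metric_counts.items(), key=lambda item: (-item[1], item[0]))
--     return ranked[0][0] if ranked else None
-- ===== SOURCE B (Python) =====
-- _MONITOR_PRIORITY_METRICS = (
--     "accuracy",
--     "acc",
--     "f1",
--     "bleu",
--     "rouge",
--     "score",
--     "success_rate",
--     "win_rate",
--     "loss",
--     "val_loss",
--     "train_loss",
--     "error",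
--     "wer",
--     "cer",
-- )
--
--
-- def _select_monitor_metric(result_summaries):
--     # Count every metric key (insertion order preserved by the dict).
--     counts = {}
--     for item in result_summaries:
--         for k in (item.get("metrics") or {}):
--             counts[k] = counts.get(k, 0) + 1
--     if not counts:
--         return None
--
--     P = len(_MONITOR_PRIORITY_METRICS)
--
--     def sel_key(entry):
--         # One total order replacing A's staged selection: eligible keys
--         # (count >= 2 matching a priority substring) sort strictly before
--         # everything else by (rank, insertion position); the remaining keys
--         # share the (P, 0) prefix and fall back to (-count, name).
--         pos, (key, count) = entry
--         low = key.lower()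
--         rank = P
--         if count >= 2:
--             for j, pref in enumerate(_MONITOR_PRIORITY_METRICS):
--                 if pref in low:
--                     rank = j
--                     break
--         if rank < P:
--             return (rank, pos, -count, key)
--         return (P, 0, -count, key)
--
--     return min(enumerate(counts.items()), key=sel_key)[1][0]
-- ===== Notes on version B (the rewrite author's own statement) =====
-- stated objective: alternative
-- what changed: Replaces A's staged selection (a nested priority-by-keys scan with early return, then a sort for the fallback) by a single min over enumerate(counts.items()) under one composite lexicographic key (rank, position, -count, name), with eligible keys ranking strictly before all others.
import Mathlib
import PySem

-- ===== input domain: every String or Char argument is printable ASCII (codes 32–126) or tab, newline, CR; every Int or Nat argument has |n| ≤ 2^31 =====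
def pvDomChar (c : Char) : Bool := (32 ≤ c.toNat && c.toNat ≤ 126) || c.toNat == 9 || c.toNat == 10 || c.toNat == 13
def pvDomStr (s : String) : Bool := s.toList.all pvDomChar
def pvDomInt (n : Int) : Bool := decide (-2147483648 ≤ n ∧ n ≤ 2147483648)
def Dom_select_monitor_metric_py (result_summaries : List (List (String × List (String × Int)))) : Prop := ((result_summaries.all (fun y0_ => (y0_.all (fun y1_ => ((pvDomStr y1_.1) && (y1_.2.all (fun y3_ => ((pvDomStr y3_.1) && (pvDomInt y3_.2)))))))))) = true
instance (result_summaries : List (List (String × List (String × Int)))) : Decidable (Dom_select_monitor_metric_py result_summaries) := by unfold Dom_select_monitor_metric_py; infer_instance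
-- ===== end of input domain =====

-- B replaces A's staged selection (nested priority×keys scan, then a sort fallback) by ONE min
-- over the enumerated counts under a single composite lexicographic key: a different decomposition.


-- the module constant _MONITOR_PRIORITY_METRICS (shared by both Pythons)
def pvPriorities : List String :=
  ["accuracy", "acc", "f1", "bleu", "rouge", "score", "success_rate",
   "win_rate", "loss", "val_loss", "train_loss", "error", "wer", "cer"]

-- ===== PORT A =====
-- A's counting loop: nested fold, dict.get(key, 0) + 1 per key of each item's "metrics" dict
def pvCountsA (result_summaries : List (List (String × List (String × Int)))) : PySem.Dict String Int :=
  result_summaries.foldl (fun d item =>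
    ((PySem.Dict.ofList ((PySem.Dict.ofList item).getD "metrics" [])).keys).foldl
      (fun d key => d.insert key (d.getD key 0 + 1)) d)
    PySem.Dict.empty

def select_monitor_metric_py (result_summaries : List (List (String × List (String × Int)))) : Option String :=
  if (pvCountsA result_summaries).items = [] then none
  else
    match pvPriorities.findSome? (fun preferred =>
        ((pvCountsA result_summaries).items.find? (fun kc =>
          PySem.Str.isIn preferred (PySem.Str.lower kc.1) && decide (2 ≤ kc.2))).map (·.1)) with
    | some key => some key
    | none =>
      match PySem.List.sorted2 (pvCountsA result_summaries).items
          (fun it => -it.2) (fun it => it.1) with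
      | [] => none
      | kc :: _ => some kc.1

-- ===== PORT B =====
-- Source B's counting loop (same nested loop as A's Python)
def pvCountsB (result_summaries : List (List (String × List (String × Int)))) : PySem.Dict String Int :=
  result_summaries.foldl (fun d item =>
    ((PySem.Dict.ofList ((PySem.Dict.ofList item).getD "metrics" [])).keys).foldl
      (fun d key => d.insert key (d.getD key 0 + 1)) d)
    PySem.Dict.empty

-- Source B's sel_key: the composite tuple (rank, pos, -count, key) / (P, 0, -count, key)
def pvSelKey (entry : Int × (String × Int)) : Int × Int × Int × String :=
  let low := PySem.Str.lower entry.2.1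
  let pP : Int := (pvPriorities.length : Int)
  let rank : Int :=
    if 2 ≤ entry.2.2 then
      match (PySem.List.enumerate pvPriorities).find? (fun jp => PySem.Str.isIn jp.2 low) with
      | some jp => jp.1
      | none => pP
    else pP
  if rank < pP then (rank, entry.1, -entry.2.2, entry.2.1)
  else (pP, 0, -entry.2.2, entry.2.1)

-- Python's '<' on 4-tuples, lexicographic
def pvLt4 (a b : Int × Int × Int × String) : Bool :=
  decide (a.1 < b.1) ||
    (a.1 == b.1 && (decide (a.2.1 < b.2.1) ||
      (a.2.1 == b.2.1 && (decide (a.2.2.1 < b.2.2.1) ||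
        (a.2.2.1 == b.2.2.1 && decide (a.2.2.2 < b.2.2.2))))))

-- min(enumerate(counts.items()), key=sel_key): a left fold keeping the first minimum
def select_monitor_metric_py_alt (result_summaries : List (List (String × List (String × Int)))) : Option String :=
  if (pvCountsB result_summaries).items = [] then none
  else
    match PySem.List.enumerate (pvCountsB result_summaries).items with
    | [] => none
    | e :: rest =>
      some ((rest.foldl (fun b y => if pvLt4 (pvSelKey y) (pvSelKey b) then y else b) e).2.1)

-- ===== PRECONDITION & SPEC =====
def Spec_select_monitor_metric_py (result_summaries : List (List (String × List (String × Int)))) (out : Option String) : Prop := out = select_monitor_metric_py_alt result_summaries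
instance (result_summaries : List (List (String × List (String × Int)))) (out : Option String) : Decidable (Spec_select_monitor_metric_py result_summaries out) := by unfold Spec_select_monitor_metric_py; infer_instance

-- ===== CLAIM (what is proved, stated in full; the proofs are below) =====
def Claim_equal_select_monitor_metric_py : Prop := ∀ (result_summaries : List (List (String × List (String × Int)))), Dom_select_monitor_metric_py result_summaries → Spec_select_monitor_metric_py result_summaries (select_monitor_metric_py result_summaries)

-- ===== LEMMAS AND PROOFS =====

-- proof-side vocabulary
def pvMatch (p k : String) : Bool := PySem.Str.isIn p (PySem.Str.lower k)

def pvRank (P : List String) (s : Int) (k : String) : Option Int :=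
  ((PySem.List.enumerate P s).find? (fun ip => pvMatch ip.2 k)).map (·.1)

def pvStep (m : Option (Int × String)) (x : Int × String) : Option (Int × String) :=
  match m with
  | none => some x
  | some b => if x.1 < b.1 then some x else m

-- the (rank, key) candidates: eligible (count ≥ 2) keys that match some priority
def pvCl (P : List String) (s : Int) (items : List (String × Int)) : List (Int × String) :=
  items.filterMap (fun kc =>
    if 2 ≤ kc.2 then (pvRank P s kc.1).map (fun r => (r, kc.1)) else none)

theorem pv_counts_eq (result_summaries : List (List (String × List (String × Int)))) :
    pvCountsA result_summaries = pvCountsB result_summaries := rfl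

-- ranks carry the enumerate offset and are bounded by it plus the length
lemma pv_rank_ge (P : List String) (s : Int) (k : String) (r : Int)
    (h : pvRank P s k = some r) : s ≤ r := by
  unfold pvRank at h
  cases hf : (PySem.List.enumerate P s).find? (fun ip => pvMatch ip.2 k) with
  | none => rw [hf] at h; simp at h
  | some ip =>
    rw [hf] at h
    simp only [Option.map_some, Option.some.injEq] at h
    have hmem := List.mem_of_find?_eq_some hf
    rw [PySem.List.mem_enumerate_iff] at hmem
    obtain ⟨j, hj, hip⟩ := hmem
    rw [hip] at h
    simp at h
    omega

lemma pv_rank_lt (P : List String) (s : Int) (k : String) (r : Int)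
    (h : pvRank P s k = some r) : r < s + P.length := by
  unfold pvRank at h
  cases hf : (PySem.List.enumerate P s).find? (fun ip => pvMatch ip.2 k) with
  | none => rw [hf] at h; simp at h
  | some ip =>
    rw [hf] at h
    simp only [Option.map_some, Option.some.injEq] at h
    have hmem := List.mem_of_find?_eq_some hf
    rw [PySem.List.mem_enumerate_iff] at hmem
    obtain ⟨j, hj, hip⟩ := hmem
    rw [hip] at h
    simp at h
    omega

lemma pv_rank_nil (s : Int) (k : String) : pvRank [] s k = none := by
  simp [pvRank, PySem.List.enumerate_nil]

lemma pv_rank_cons_pos (p : String) (P : List String) (s : Int) (k : String)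
    (h : pvMatch p k = true) : pvRank (p :: P) s k = some s := by
  unfold pvRank
  rw [PySem.List.enumerate_cons, List.find?_cons_of_pos (by simpa using h)]
  rfl

lemma pv_rank_cons_neg (p : String) (P : List String) (s : Int) (k : String)
    (h : pvMatch p k = false) : pvRank (p :: P) s k = pvRank P (s + 1) k := by
  unfold pvRank
  rw [PySem.List.enumerate_cons, List.find?_cons_of_neg (by simp [h])]

-- the pvStep fold keeps a minimal accumulator
lemma pv_fold_keep (l : List (Int × String)) (b : Int × String)
    (h : ∀ x ∈ l, b.1 ≤ x.1) : l.foldl pvStep (some b) = some b := by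
  induction l with
  | nil => rfl
  | cons x t ih =>
    rw [List.foldl_cons]
    have hx : ¬ x.1 < b.1 := not_lt.mpr (h x List.mem_cons_self)
    simp only [pvStep, if_neg hx]
    exact ih (fun z hz => h z (List.mem_cons_of_mem _ hz))

lemma pv_fold_find (s : Int) :
    ∀ (l : List (Int × String)) (b y : Int × String),
    (∀ x ∈ l, s ≤ x.1) → s < b.1 → l.find? (fun x => decide (x.1 = s)) = some y →
    l.foldl pvStep (some b) = some y := by
  intro l
  induction l with
  | nil => intro b y _ _ h; simp at h
  | cons x t ih =>
    intro b y hall hb hf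
    rw [List.foldl_cons]
    by_cases hx : x.1 = s
    · rw [List.find?_cons_of_pos (by simp [hx])] at hf
      injection hf with hxy
      subst hxy
      have hlt : x.1 < b.1 := by omega
      simp only [pvStep, if_pos hlt]
      exact pv_fold_keep t x (fun z hz => by
        have := hall z (List.mem_cons_of_mem _ hz); omega)
    · rw [List.find?_cons_of_neg (by simp [hx])] at hf
      have hxs : s < x.1 := lt_of_le_of_ne (hall x List.mem_cons_self) (Ne.symm hx)
      have hall' : ∀ z ∈ t, s ≤ z.1 := fun z hz => hall z (List.mem_cons_of_mem _ hz)
      simp only [pvStep]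
      split
      · exact ih x y hall' hxs hf
      · exact ih b y hall' hb hf

lemma pv_fold_min (s : Int) (l : List (Int × String)) (y : Int × String)
    (hall : ∀ x ∈ l, s ≤ x.1) (hf : l.find? (fun x => decide (x.1 = s)) = some y) :
    l.foldl pvStep none = some y := by
  cases l with
  | nil => simp at hf
  | cons x t =>
    rw [List.foldl_cons]
    have hall' : ∀ z ∈ t, s ≤ z.1 := fun z hz => hall z (List.mem_cons_of_mem _ hz)
    show t.foldl pvStep (some x) = some y
    by_cases hx : x.1 = s
    · rw [List.find?_cons_of_pos (by simp [hx])] at hf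
      injection hf with hxy
      subst hxy
      exact pv_fold_keep t x (fun z hz => by have := hall' z hz; omega)
    · rw [List.find?_cons_of_neg (by simp [hx])] at hf
      have hxs : s < x.1 := lt_of_le_of_ne (hall x List.mem_cons_self) (Ne.symm hx)
      exact pv_fold_find s t x y hall' hxs hf

-- every candidate rank is ≥ the offset
lemma pv_cl_ge (P : List String) (s : Int) (items : List (String × Int)) :
    ∀ x ∈ pvCl P s items, s ≤ x.1 := by
  intro x hx
  unfold pvCl at hx
  rw [List.mem_filterMap] at hx
  obtain ⟨kc, _, hkc⟩ := hx
  by_cases h2 : 2 ≤ kc.2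
  · rw [if_pos h2] at hkc
    cases hr : pvRank P s kc.1 with
    | none => rw [hr] at hkc; simp at hkc
    | some r =>
      rw [hr] at hkc
      simp only [Option.map_some, Option.some.injEq] at hkc
      have := pv_rank_ge P s kc.1 r hr
      rw [← hkc]
      exact this
  · rw [if_neg h2] at hkc; simp at hkc

-- A's inner find lifts to a find over the candidates at rank s
lemma pv_cl_find (p : String) (P : List String) (s : Int) :
    ∀ (items : List (String × Int)) (m : String × Int),
    items.find? (fun kc => pvMatch p kc.1 && decide (2 ≤ kc.2)) = some m →
    (pvCl (p :: P) s items).find? (fun x => decide (x.1 = s)) = some (s, m.1) := by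
  intro items
  induction items with
  | nil => intro m h; simp at h
  | cons kc t ih =>
    intro m h
    by_cases hm : (pvMatch p kc.1 && decide (2 ≤ kc.2)) = true
    · rw [List.find?_cons_of_pos (p := fun kc : String × Int => pvMatch p kc.1 && decide (2 ≤ kc.2)) hm] at h
      injection h with hmk
      subst hmk
      have hand : pvMatch p kc.1 = true ∧ decide ((2 : Int) ≤ kc.2) = true := by
        rw [← Bool.and_eq_true]; exact hm
      have h2 : (2 : Int) ≤ kc.2 := of_decide_eq_true hand.2
      have hcl : pvCl (p :: P) s (kc :: t) = (s, kc.1) :: pvCl (p :: P) s t :=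
        List.filterMap_cons_some
          (by rw [if_pos h2, pv_rank_cons_pos p P s kc.1 hand.1]; rfl)
      rw [hcl, List.find?_cons_of_pos (by simp)]
    · rw [List.find?_cons_of_neg (p := fun kc : String × Int => pvMatch p kc.1 && decide (2 ≤ kc.2)) hm] at h
      have ihm := ih m h
      by_cases h2 : (2 : Int) ≤ kc.2
      · have hmb : pvMatch p kc.1 = false := by
          cases hmbv : pvMatch p kc.1 with
          | false => rfl
          | true => exact absurd (by rw [Bool.and_eq_true]; exact ⟨hmbv, decide_eq_true h2⟩) hm
        cases hr : pvRank P (s + 1) kc.1 with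
        | none =>
          have hcl : pvCl (p :: P) s (kc :: t) = pvCl (p :: P) s t :=
            List.filterMap_cons_none
              (by rw [if_pos h2, pv_rank_cons_neg p P s kc.1 hmb, hr]; rfl)
          rw [hcl]; exact ihm
        | some r =>
          have hrge : s + 1 ≤ r := pv_rank_ge P (s + 1) kc.1 r hr
          have hcl : pvCl (p :: P) s (kc :: t) = (r, kc.1) :: pvCl (p :: P) s t :=
            List.filterMap_cons_some
              (by rw [if_pos h2, pv_rank_cons_neg p P s kc.1 hmb, hr]; rfl)
          rw [hcl, List.find?_cons_of_neg (by simp; omega)]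
          exact ihm
      · have hcl : pvCl (p :: P) s (kc :: t) = pvCl (p :: P) s t :=
          List.filterMap_cons_none (by rw [if_neg h2])
        rw [hcl]; exact ihm

-- the heart of the A side: A's priority × keys scan = first-minimal-rank over the candidates
lemma pv_A_eq (items : List (String × Int)) :
    ∀ (P : List String) (s : Int),
    P.findSome? (fun p =>
        (items.find? (fun kc => pvMatch p kc.1 && decide (2 ≤ kc.2))).map (·.1))
      = ((pvCl P s items).foldl pvStep none).map (·.2) := by
  intro P
  induction P with
  | nil =>
    intro s
    have hcl : pvCl [] s items = [] := by
      unfold pvCl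
      rw [List.filterMap_eq_nil_iff]
      intro kc _
      by_cases h2 : 2 ≤ kc.2
      · rw [if_pos h2, pv_rank_nil]; rfl
      · rw [if_neg h2]
    rw [hcl]
    rfl
  | cons p P' ih =>
    intro s
    rw [List.findSome?_cons]
    cases hf : items.find? (fun kc => pvMatch p kc.1 && decide (2 ≤ kc.2)) with
    | none =>
      have hcl : pvCl (p :: P') s items = pvCl P' (s + 1) items := by
        unfold pvCl
        apply List.filterMap_congr
        intro kc hkc
        by_cases h2 : 2 ≤ kc.2
        · rw [if_pos h2, if_pos h2]
          have hmatch : pvMatch p kc.1 = false := by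
            have hnone := List.find?_eq_none.mp hf kc hkc
            cases hmbv : pvMatch p kc.1 with
            | false => rfl
            | true =>
              exact absurd (by rw [Bool.and_eq_true]; exact ⟨hmbv, decide_eq_true h2⟩) hnone
          rw [pv_rank_cons_neg p P' s kc.1 hmatch]
        · rw [if_neg h2, if_neg h2]
      rw [hcl, ← ih (s + 1)]
      rfl
    | some m =>
      have hfind := pv_cl_find p P' s items m hf
      have hall := pv_cl_ge (p :: P') s items
      rw [pv_fold_min s _ _ hall hfind]
      rfl

-- head of a stable insertion sort, as a first-min fold (for A's sorted fallback)
lemma pv_head?_insertBy {α : Type} (before : α → α → Bool) (x : α) (l : List α) :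
    (PySem.List.insertBy before x l).head? =
      match l.head? with
      | none => some x
      | some y => if before x y then some x else some y := by
  cases l with
  | nil => simp [PySem.List.insertBy]
  | cons y t =>
    simp only [PySem.List.insertBy, List.head?_cons]
    split <;> simp

lemma pv_head?_foldl_insertBy {α : Type} (before : α → α → Bool) :
    ∀ (xs acc : List α),
      (xs.foldl (fun a x => PySem.List.insertBy before x a) acc).head? =
      xs.foldl (fun m x =>
        match m with
        | none => some x
        | some y => if before x y then some x else some y) acc.head? := by
  intro xs
  induction xs with
  | nil => intro acc; rfl
  | cons a t ih =>
    intro acc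
    rw [List.foldl_cons, ih, pv_head?_insertBy, List.foldl_cons]

-- an Option-valued first-min fold is the plain first-min fold once seeded
lemma pv_optfold {α : Type} (before : α → α → Bool) :
    ∀ (t : List α) (x : α),
      t.foldl (fun m z =>
        match m with
        | none => some z
        | some y => if before z y then some z else some y) (some x)
      = some (t.foldl (fun b z => if before z b then z else b) x) := by
  intro t
  induction t with
  | nil => intro x; rfl
  | cons z t ih =>
    intro x
    rw [List.foldl_cons, List.foldl_cons]
    by_cases h : before z x = true
    · simp only [h]
      exact ih z
    · simp only [Bool.not_eq_true] at h
      simp only [h]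
      exact ih x

-- ===== generic first-strict-minimum fold =====
lemma pv_minfold_unique {α : Type} (lt : α → α → Bool)
    (hi : ∀ a, lt a a = false) (ha : ∀ a b, lt a b = true → lt b a = false) :
    ∀ (t : List α) (x m : α), (x = m ∨ m ∈ t) →
      (∀ y, (y = x ∨ y ∈ t) → y ≠ m → lt m y = true) →
      t.foldl (fun b y => if lt y b then y else b) x = m := by
  intro t
  induction t with
  | nil =>
    intro x m hm _
    rcases hm with h | h
    · simp [List.foldl_nil, h]
    · simp at h
  | cons z t ih =>
    intro x m hm hy
    rw [List.foldl_cons]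
    by_cases hxm : x = m
    · have hzf : lt z x = false := by
        rw [hxm]
        by_cases hz : z = m
        · rw [hz]; exact hi m
        · exact ha _ _ (hy z (Or.inr List.mem_cons_self) hz)
      have hx' : (if lt z x = true then z else x) = m := by
        simp only [hzf, Bool.false_eq_true, if_false]; exact hxm
      refine ih _ m (Or.inl hx') (fun y hy' hne => hy y ?_ hne)
      rcases hy' with h' | h'
      · rw [hx'] at h'; exact Or.inl (h'.trans hxm.symm)
      · exact Or.inr (List.mem_cons_of_mem _ h')
    · rcases hm with h | h
      · exact absurd h hxm
      rcases List.mem_cons.mp h with hzm | hmt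
      · have hzt : lt z x = true := by
          rw [← hzm]; exact hy x (Or.inl rfl) hxm
        have hx' : (if lt z x = true then z else x) = m := by
          simp only [hzt, if_true]; exact hzm.symm
        refine ih _ m (Or.inl hx') (fun y hy' hne => hy y ?_ hne)
        rcases hy' with h' | h'
        · rw [hx'] at h'
          exact Or.inr (by rw [h', hzm]; exact List.mem_cons_self)
        · exact Or.inr (List.mem_cons_of_mem _ h')
      · refine ih _ m (Or.inr hmt) (fun y hy' hne => hy y ?_ hne)
        rcases hy' with h' | h'
        · by_cases hc : lt z x = true
          · rw [if_pos hc] at h'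
            exact Or.inr (by rw [h']; exact List.mem_cons_self)
          · rw [if_neg hc] at h'
            exact Or.inl h'
        · exact Or.inr (List.mem_cons_of_mem _ h')

-- pvLt4 is irreflexive and asymmetric
lemma pvLt4_irrefl (a : Int × Int × Int × String) : pvLt4 a a = false := by
  simp [pvLt4]

lemma pvLt4_asymm (a b : Int × Int × Int × String) (h : pvLt4 a b = true) :
    pvLt4 b a = false := by
  obtain ⟨a1, a2, a3, a4⟩ := a
  obtain ⟨b1, b2, b3, b4⟩ := b
  rw [Bool.eq_false_iff]
  intro h2
  simp only [pvLt4, Bool.or_eq_true, Bool.and_eq_true, decide_eq_true_eq, beq_iff_eq] at h h2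
  rcases h with h | ⟨e1, h | ⟨e2, h | ⟨e3, h⟩⟩⟩ <;>
    rcases h2 with h2 | ⟨f1, h2 | ⟨f2, h2 | ⟨f3, h2⟩⟩⟩ <;>
    first
    | omega
    | exact (lt_asymm h) h2

-- ===== bridging Source B's sel_key to the proof vocabulary =====
def pvCand (kc : String × Int) : Bool :=
  decide ((2 : Int) ≤ kc.2) && (pvRank pvPriorities 0 kc.1).isSome

def pvBefore (a b : String × Int) : Bool :=
  decide ((-a.2 : Int) < -b.2) || !decide ((-b.2 : Int) < -a.2) && decide (a.1 < b.1)

lemma pvP_len : ((pvPriorities.length : Nat) : Int) = 14 := by decide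

lemma pv_selKey_cand (e : Int × (String × Int)) (r : Int) (h2 : 2 ≤ e.2.2)
    (hr : pvRank pvPriorities 0 e.2.1 = some r) :
    pvSelKey e = (r, e.1, -e.2.2, e.2.1) := by
  have hlt : r < 14 := by
    have := pv_rank_lt pvPriorities 0 e.2.1 r hr
    simpa using this
  unfold pvRank at hr
  cases hf : (PySem.List.enumerate pvPriorities 0).find?
      (fun ip => pvMatch ip.2 e.2.1) with
  | none => rw [hf] at hr; simp at hr
  | some jp =>
    rw [hf] at hr
    simp only [Option.map_some, Option.some.injEq] at hr
    simp only [pvMatch] at hf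
    simp only [pvSelKey, hf, if_pos h2, pvP_len, hr, if_pos hlt]

lemma pv_selKey_noncand (e : Int × (String × Int)) (h : pvCand e.2 = false) :
    pvSelKey e = (14, 0, -e.2.2, e.2.1) := by
  unfold pvCand at h
  rw [Bool.and_eq_false_iff] at h
  rcases h with h | h
  · rw [decide_eq_false_iff_not] at h
    simp only [pvSelKey, if_neg h, pvP_len, if_neg (by omega : ¬ (14 : Int) < 14)]
  · rw [Option.isSome_eq_false_iff, Option.isNone_iff_eq_none] at h
    unfold pvRank at h
    rw [Option.map_eq_none_iff] at h
    simp only [pvMatch] at h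
    by_cases h2 : 2 ≤ e.2.2
    · simp only [pvSelKey, if_pos h2, h, pvP_len, if_neg (by omega : ¬ (14 : Int) < 14)]
    · simp only [pvSelKey, if_neg h2, pvP_len, if_neg (by omega : ¬ (14 : Int) < 14)]

-- pvLt4 on two composite keys, by their leading components
lemma pv_lt4_of_lex (r1 i1 a1 r2 i2 a2 : Int) (s1 s2 : String)
    (h : r1 < r2 ∨ (r1 = r2 ∧ i1 < i2)) :
    pvLt4 (r1, i1, a1, s1) (r2, i2, a2, s2) = true := by
  simp only [pvLt4, Bool.or_eq_true, Bool.and_eq_true, decide_eq_true_eq, beq_iff_eq]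
  rcases h with h | ⟨h1, h2⟩
  · exact Or.inl h
  · exact Or.inr ⟨h1, Or.inl h2⟩

-- on two non-candidate keys, pvLt4 of the sel_keys is A's fallback comparator
lemma pv_lt4_noncand (e f : Int × (String × Int))
    (he : pvCand e.2 = false) (hf : pvCand f.2 = false) :
    pvLt4 (pvSelKey e) (pvSelKey f) = pvBefore e.2 f.2 := by
  rw [pv_selKey_noncand e he, pv_selKey_noncand f hf]
  simp only [pvLt4, pvBefore]
  by_cases h1 : (-e.2.2 : Int) < -f.2.2 <;> by_cases h2 : (-f.2.2 : Int) < -e.2.2 <;>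
    simp [h1, h2] <;> omega

-- a pvStep fold seeded with some never yields none
lemma pv_fold_ne_none : ∀ (t : List (Int × String)) (b : Int × String),
    t.foldl pvStep (some b) ≠ none := by
  intro t
  induction t with
  | nil => intro b h; simp at h
  | cons x t ih =>
    intro b
    rw [List.foldl_cons,
      show pvStep (some b) x = if x.1 < b.1 then some x else some b from rfl]
    by_cases hx : x.1 < b.1
    · rw [if_pos hx]; exact ih x
    · rw [if_neg hx]; exact ih b

-- the pvStep fold finds the FIRST element of minimal rank: a three-way split
lemma pv_step_fold_split :
    ∀ (l : List (Int × String)) (b w : Int × String),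
    l.foldl pvStep (some b) = some w →
    (w = b ∧ ∀ x ∈ l, b.1 ≤ x.1) ∨
    (∃ l1 l2, l = l1 ++ w :: l2 ∧ w.1 < b.1 ∧
      (∀ x ∈ l1, w.1 < x.1) ∧ (∀ x ∈ l2, w.1 ≤ x.1)) := by
  intro l
  induction l with
  | nil =>
    intro b w h
    simp only [List.foldl_nil, Option.some.injEq] at h
    exact Or.inl ⟨h.symm, by simp⟩
  | cons x t ih =>
    intro b w h
    rw [List.foldl_cons] at h
    by_cases hx : x.1 < b.1
    · rw [show pvStep (some b) x = some x by
          rw [show pvStep (some b) x = if x.1 < b.1 then some x else some b from rfl, if_pos hx]] at h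
      rcases ih x w h with ⟨hw, hall⟩ | ⟨t1, t2, ht, hlt, h1, h2⟩
      · subst hw
        exact Or.inr ⟨[], t, by simp, hx, by simp, hall⟩
      · refine Or.inr ⟨x :: t1, t2, by rw [ht]; rfl, by omega, ?_, h2⟩
        intro z hz
        rcases List.mem_cons.mp hz with hz | hz
        · subst hz; omega
        · exact h1 z hz
    · rw [show pvStep (some b) x = some b by
          rw [show pvStep (some b) x = if x.1 < b.1 then some x else some b from rfl, if_neg hx]] at h
      rcases ih b w h with ⟨hw, hall⟩ | ⟨t1, t2, ht, hlt, h1, h2⟩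
      · refine Or.inl ⟨hw, ?_⟩
        intro z hz
        rcases List.mem_cons.mp hz with hz | hz
        · subst hz; omega
        · exact hall z hz
      · refine Or.inr ⟨x :: t1, t2, by rw [ht]; rfl, hlt, ?_, h2⟩
        intro z hz
        rcases List.mem_cons.mp hz with hz | hz
        · subst hz; omega
        · exact h1 z hz

lemma pv_step_fold_none_split (l : List (Int × String)) (w : Int × String)
    (h : l.foldl pvStep none = some w) :
    ∃ l1 l2, l = l1 ++ w :: l2 ∧ (∀ x ∈ l1, w.1 < x.1) ∧ (∀ x ∈ l2, w.1 ≤ x.1) := by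
  cases l with
  | nil => exact absurd h (by simp)
  | cons x t =>
    rw [List.foldl_cons] at h
    rw [show pvStep none x = some x from rfl] at h
    rcases pv_step_fold_split t x w h with ⟨hw, hall⟩ | ⟨t1, t2, ht, _, h1, h2⟩
    · subst hw
      exact ⟨[], t, by simp, by simp, hall⟩
    · refine ⟨x :: t1, t2, by rw [ht]; rfl, ?_, h2⟩
      intro z hz
      rcases List.mem_cons.mp hz with hz | hz
      · subst hz; omega
      · exact h1 z hz

-- the candidate list, as filter-then-map
lemma pv_cl_eq_filter_map (P : List String) (s : Int) (items : List (String × Int)) :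
    pvCl P s items =
      (items.filter (fun kc => decide (2 ≤ kc.2) && (pvRank P s kc.1).isSome)).map
        (fun kc => ((pvRank P s kc.1).getD 0, kc.1)) := by
  induction items with
  | nil => rfl
  | cons kc t ih =>
    by_cases h2 : (2 : Int) ≤ kc.2
    · cases hr : pvRank P s kc.1 with
      | none =>
        rw [show pvCl P s (kc :: t) = pvCl P s t from
          List.filterMap_cons_none (by rw [if_pos h2, hr]; rfl)]
        rw [List.filter_cons_of_neg (by simp [h2, hr])]
        exact ih
      | some r =>
        rw [show pvCl P s (kc :: t) = (r, kc.1) :: pvCl P s t from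
          List.filterMap_cons_some (by rw [if_pos h2, hr]; rfl)]
        rw [List.filter_cons_of_pos (by simp [h2, hr])]
        rw [List.map_cons, hr]
        simp only [Option.getD_some, List.cons.injEq]
        exact ⟨trivial, ih⟩
    · rw [show pvCl P s (kc :: t) = pvCl P s t from
        List.filterMap_cons_none (by rw [if_neg h2])]
      rw [List.filter_cons_of_neg (by simp [h2])]
      exact ih

-- the non-candidate fold of B: positions and ranks never matter, it is A's fallback fold
lemma pv_case2_fold :
    ∀ (t : List (String × Int)) (s : Int) (x : Int × (String × Int)),
    pvCand x.2 = false → (∀ kc ∈ t, pvCand kc = false) →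
    ((PySem.List.enumerate t s).foldl
        (fun b y => if pvLt4 (pvSelKey y) (pvSelKey b) then y else b) x).2
      = t.foldl (fun b z => if pvBefore z b then z else b) x.2 := by
  intro t
  induction t with
  | nil => intro s x _ _; rw [PySem.List.enumerate_nil]; rfl
  | cons kc t ih =>
    intro s x hx ht
    rw [PySem.List.enumerate_cons, List.foldl_cons, List.foldl_cons]
    have hkc : pvCand kc = false := ht kc List.mem_cons_self
    have hstep : pvLt4 (pvSelKey (s, kc)) (pvSelKey x) = pvBefore kc x.2 :=
      pv_lt4_noncand (s, kc) x hkc hx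
    rw [hstep]
    by_cases hb : pvBefore kc x.2 = true
    · rw [if_pos hb, if_pos hb]
      exact ih (s + 1) (s, kc) hkc (fun z hz => ht z (List.mem_cons_of_mem _ hz))
    · rw [if_neg hb, if_neg hb]
      exact ih (s + 1) x hx (fun z hz => ht z (List.mem_cons_of_mem _ hz))

-- ===== the main selection equality, per candidate case =====
lemma pv_main (items : List (String × Int)) (hnil : items ≠ []) :
    (match pvPriorities.findSome? (fun p =>
        (items.find? (fun kc => pvMatch p kc.1 && decide (2 ≤ kc.2))).map (·.1)) with
     | some key => some key
     | none =>
       match PySem.List.sorted2 items (fun it => -it.2) (fun it => it.1) with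
       | [] => none
       | kc :: _ => some kc.1)
    = (match PySem.List.enumerate items 0 with
       | [] => none
       | e :: rest =>
         some ((rest.foldl
           (fun b y => if pvLt4 (pvSelKey y) (pvSelKey b) then y else b) e).2.1)) := by
  have hCfix : (fun (kc : String × Int) =>
      decide (2 ≤ kc.2) && (pvRank pvPriorities 0 kc.1).isSome) = pvCand := rfl
  have hC := pv_cl_eq_filter_map pvPriorities 0 items
  rw [hCfix] at hC
  rw [pv_A_eq items pvPriorities 0]
  cases hw : (pvCl pvPriorities 0 items).foldl pvStep none with
  | none =>
    -- no candidate at all: A's fallback sort-head vs B's min, both driven by (-count, key)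
    have hclnil : pvCl pvPriorities 0 items = [] := by
      cases hc : pvCl pvPriorities 0 items with
      | nil => rfl
      | cons c cs =>
        rw [hc, List.foldl_cons] at hw
        exact absurd hw (pv_fold_ne_none cs c)
    have hfexact : items.filter pvCand = [] := by
      rw [hclnil] at hC
      cases hff : items.filter pvCand with
      | nil => rfl
      | cons a b => rw [hff] at hC; simp at hC
    have hnone : ∀ kc ∈ items, pvCand kc = false := by
      intro kc hkc
      have := List.filter_eq_nil_iff.mp hfexact kc hkc
      simpa using this
    cases items with
    | nil => exact absurd rfl hnil
    | cons kc0 rest =>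
      have hhead : (PySem.List.sorted2 (kc0 :: rest)
          (fun it => -it.2) (fun it => it.1)).head?
          = some (rest.foldl (fun b z => if pvBefore z b then z else b) kc0) := by
        have h2 : PySem.List.sorted2 (kc0 :: rest) (fun it => -it.2) (fun it => it.1)
            = (kc0 :: rest).foldl
                (fun a x => PySem.List.insertBy pvBefore x a) [] := rfl
        rw [h2, pv_head?_foldl_insertBy pvBefore (kc0 :: rest) []]
        rw [List.foldl_cons]
        exact pv_optfold pvBefore rest kc0
      simp only [Option.map_none]
      cases hs : PySem.List.sorted2 (kc0 :: rest) (fun it => -it.2) (fun it => it.1) with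
      | nil => rw [hs] at hhead; simp at hhead
      | cons h tl =>
        rw [hs] at hhead
        simp only [List.head?_cons, Option.some.injEq] at hhead
        rw [PySem.List.enumerate_cons]
        have hfold := pv_case2_fold rest 1 (0, kc0)
          (hnone kc0 List.mem_cons_self)
          (fun z hz => hnone z (List.mem_cons_of_mem _ hz))
        simp only [show (0 : Int) + 1 = 1 from rfl]
        rw [hfold, ← hhead]
  | some w =>
    -- some candidate: both pick the first key of minimal priority rank
    simp only [Option.map_some]
    obtain ⟨l1, l2, hsplit, hl1, hl2⟩ := pv_step_fold_none_split _ w hw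
    rw [hC] at hsplit
    obtain ⟨F1, F2', hFsplit, hF1, hF2'⟩ := List.map_eq_append_iff.mp hsplit
    obtain ⟨kc0, F2, hF2eq, hgkc0, hF2⟩ := List.map_eq_cons_iff.mp hF2'
    rw [hF2eq] at hFsplit
    -- candidate data of kc0
    have hkc0mem : kc0 ∈ items.filter pvCand := by
      rw [hFsplit]
      exact List.mem_append_right _ List.mem_cons_self
    have hkc0cand : pvCand kc0 = true := (List.mem_filter.mp hkc0mem).2
    have h2kc0 : (2 : Int) ≤ kc0.2 := by
      have := (Bool.and_eq_true _ _).mp hkc0cand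
      exact of_decide_eq_true this.1
    obtain ⟨r0, hr0⟩ : ∃ r0, pvRank pvPriorities 0 kc0.1 = some r0 := by
      have := (Bool.and_eq_true _ _).mp hkc0cand
      exact Option.isSome_iff_exists.mp this.2
    have hw1 : w.1 = r0 ∧ w.2 = kc0.1 := by
      rw [hr0] at hgkc0
      simp only [Option.getD_some] at hgkc0
      rw [← hgkc0]
      exact ⟨rfl, rfl⟩
    have hr0lt : r0 < 14 := by
      have := pv_rank_lt pvPriorities 0 kc0.1 r0 hr0
      simpa using this
    -- the filtered entry list and its split
    have hms : (PySem.List.enumerate items 0).map (·.2) = items :=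
      PySem.List.map_snd_enumerate items 0
    have hEf : ((PySem.List.enumerate items 0).filter (fun e => pvCand e.2)).map (·.2)
        = items.filter pvCand := by
      conv_rhs => rw [← hms]
      rw [List.filter_map]
      rfl
    rw [hFsplit] at hEf
    obtain ⟨E1, E2', hEsplit, hE1, hE2'⟩ := List.map_eq_append_iff.mp hEf
    obtain ⟨e0, E2, hE2eq, he0, hE2⟩ := List.map_eq_cons_iff.mp hE2'
    rw [hE2eq] at hEsplit
    have hpwE : (PySem.List.enumerate items 0).Pairwise (fun p q => p.1 < q.1) :=
      PySem.List.pairwise_lt_enumerate items 0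
    have hpwF : ((PySem.List.enumerate items 0).filter
        (fun e => pvCand e.2)).Pairwise (fun p q => p.1 < q.1) :=
      hpwE.filter _
    rw [hEsplit] at hpwF
    have hpos2 : ∀ b ∈ E2, e0.1 < b.1 := by
      have := (List.pairwise_append.mp hpwF).2.1
      exact (List.pairwise_cons.mp this).1
    have he0mem : e0 ∈ PySem.List.enumerate items 0 := by
      have : e0 ∈ (PySem.List.enumerate items 0).filter (fun e => pvCand e.2) := by
        rw [hEsplit]
        exact List.mem_append_right _ List.mem_cons_self
      exact List.mem_of_mem_filter this
    have hKe0 : pvSelKey e0 = (r0, e0.1, -e0.2.2, e0.2.1) :=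
      pv_selKey_cand e0 r0 (by rw [he0]; exact h2kc0) (by rw [he0]; exact hr0)
    -- B's fold lands on e0
    cases hE : PySem.List.enumerate items 0 with
    | nil =>
      exfalso
      rw [hE] at hms
      exact hnil (by rw [← hms]; rfl)
    | cons e00 restE =>
      simp only []
      have hmem : e00 = e0 ∨ e0 ∈ restE := by
        have := he0mem
        rw [hE] at this
        rcases List.mem_cons.mp this with h | h
        · exact Or.inl h.symm
        · exact Or.inr h
      have hy : ∀ y, (y = e00 ∨ y ∈ restE) → y ≠ e0 →
          pvLt4 (pvSelKey e0) (pvSelKey y) = true := by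
        intro y hyE hne
        have hymem : y ∈ PySem.List.enumerate items 0 := by
          rw [hE]
          rcases hyE with h | h
          · exact h ▸ List.mem_cons_self
          · exact List.mem_cons_of_mem _ h
        by_cases hyc : pvCand y.2 = true
        · have hyf : y ∈ E1 ++ e0 :: E2 := by
            rw [← hEsplit]
            exact List.mem_filter.mpr ⟨hymem, hyc⟩
          have h2y : (2 : Int) ≤ y.2.2 := by
            have := (Bool.and_eq_true _ _).mp hyc
            exact of_decide_eq_true this.1
          obtain ⟨ry, hry⟩ : ∃ ry, pvRank pvPriorities 0 y.2.1 = some ry := by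
            have := (Bool.and_eq_true _ _).mp hyc
            exact Option.isSome_iff_exists.mp this.2
          have hKy : pvSelKey y = (ry, y.1, -y.2.2, y.2.1) :=
            pv_selKey_cand y ry h2y hry
          have hgy : (fun kc => ((pvRank pvPriorities 0 kc.1).getD 0, kc.1)) y.2
              = (ry, y.2.1) := by
            simp only [hry, Option.getD_some]
          rcases List.mem_append.mp hyf with hy1 | hy2
          · have : (ry, y.2.1) ∈ l1 := by
              rw [← hF1] at hl1 ⊢
              rw [← hE1, ← hgy, List.map_map]
              exact List.mem_map_of_mem hy1
            have hrank : w.1 < ry := by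
              have := hl1 _ (by
                rw [← hF1, ← hE1, List.map_map]
                exact (List.mem_map_of_mem (f := _) hy1))
              simpa [hgy] using this
            rw [hKe0, hKy]
            exact pv_lt4_of_lex _ _ _ _ _ _ _ _ (Or.inl (by omega))
          · rcases List.mem_cons.mp hy2 with hye0 | hy2'
            · exact absurd hye0 hne
            · have hrank : w.1 ≤ ry := by
                have := hl2 _ (by
                  rw [← hF2, ← hE2, List.map_map]
                  exact (List.mem_map_of_mem (f := _) hy2'))
                simpa [hgy] using this
              have hpos : e0.1 < y.1 := hpos2 y hy2'
              rw [hKe0, hKy]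
              refine pv_lt4_of_lex _ _ _ _ _ _ _ _ ?_
              rcases lt_or_eq_of_le hrank with h | h
              · exact Or.inl (by omega)
              · exact Or.inr ⟨by omega, hpos⟩
        · have hyc' : pvCand y.2 = false := by
            simpa using hyc
          rw [hKe0, pv_selKey_noncand y hyc']
          exact pv_lt4_of_lex _ _ _ _ _ _ _ _ (Or.inl (by omega))
      have hfold := pv_minfold_unique
        (fun a b => pvLt4 (pvSelKey a) (pvSelKey b))
        (fun a => pvLt4_irrefl _) (fun a b h => pvLt4_asymm _ _ h)
        restE e00 e0 hmem hy
      rw [hfold, he0, hw1.2]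

-- ===== VERDICT (by name: the statement is the Claim_ definition above) =====
theorem select_monitor_metric_py_spec : Claim_equal_select_monitor_metric_py := by
  intro rs _
  show select_monitor_metric_py rs = select_monitor_metric_py_alt rs
  unfold select_monitor_metric_py select_monitor_metric_py_alt
  rw [← pv_counts_eq]
  by_cases hnil : (pvCountsA rs).items = []
  · rw [if_pos hnil, if_pos hnil]
  · rw [if_neg hnil, if_neg hnil]
    have h := pv_main (pvCountsA rs).items hnil
    simp only [pvMatch] at h
    exact h
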